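-- pv_equiv track=rewrite | github.com/galler-ist/BaekjoonHub | 백준/Silver/11008. 복붙의 달인/복붙의 달인.py | my_copy
-- ===== SOURCE A (Python) =====
-- def my_copy(long,short):
--     result = 0
--     index = 0
--     while index<=(len(long)-len(short)):
--         Isbreak = False
--         temp_index = 0
--         # 만약 short 첫 글자랑 다르다? -> result +=1, index+=1
--         # 만약 short 첫 글자는 같다? -> 다시 for문을 돌리며 확인하는데, 그러다 아닌게 들통 -> 거기까지 들었던 칸을 더하기
--         # 그렇게 for문을 돌다가 short 끝까지 도달했다? -> result +=1, index+=len(short)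
--         for alpha in long[index:index+len(short)]:
--             if alpha == short[temp_index]:
--                 temp_index += 1
--                 continue
--             else:
--                 index += 1
--                 result +=1
--                 break
--         else:
--             index += temp_index
--             result +=1
--     if index != (len(long)-len(short)):
--         result += (len(long)-index)
--
--     return result
-- ===== SOURCE B (Python) =====
-- def my_copy(long, short):
--     n, m = len(long), len(short)
--     ops = 0
--     i = 0
--     while i + m <= n:
--         j = long.find(short, i)
--         if j == -1:
--             break
--         ops += (j - i) + 1
--         i = j + m
--     return ops + (n - i)
-- ===== Notes on version B (the rewrite author's own statement) =====
-- stated objective: faster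
-- what changed: B replaces A's per-position character-by-character window rescans (and the trailing fix-up arithmetic) by repeatedly calling str.find to jump straight to the next occurrence of short, typing the whole gap in one arithmetic step and pasting there.
import Mathlib
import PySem

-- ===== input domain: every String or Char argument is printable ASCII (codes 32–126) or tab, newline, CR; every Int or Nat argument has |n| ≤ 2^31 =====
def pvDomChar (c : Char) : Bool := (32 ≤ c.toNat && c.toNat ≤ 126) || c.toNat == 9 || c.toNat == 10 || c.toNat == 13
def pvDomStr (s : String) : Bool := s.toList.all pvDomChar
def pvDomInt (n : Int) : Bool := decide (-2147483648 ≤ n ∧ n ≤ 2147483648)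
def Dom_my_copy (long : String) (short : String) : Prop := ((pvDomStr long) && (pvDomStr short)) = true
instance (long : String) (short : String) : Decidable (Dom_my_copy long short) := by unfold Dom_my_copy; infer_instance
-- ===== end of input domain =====

-- B replaces A's per-position character rescans by jumping straight to the next
-- occurrence of `short` found with str.find; same return value whenever short ≠ "".

-- ===== PORT A =====
-- the inner `for alpha in long[index:index+len(short)]`: `some t` = the for-loop fell
-- through with temp_index = t (Python's else: fires), `none` = break.
-- `short[temp_index]` is in range on every reachable call (the window is never longer
-- than short), so the `getD` default ' ' is never read.
def myCopyFor (w : List Char) (ss : List Char) (t : Nat) : Option Nat :=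
  match w with
  | [] => some t
  | a :: w' => if a = ss.getD t ' ' then myCopyFor w' ss (t + 1) else none

-- the `while` loop; fuel only makes it total in Lean (the Python loops forever
-- exactly when short = "", excluded by Pre_); returns (index, result).
def myCopyLoop (cs ss : List Char) : Nat → Int → Int → Int × Int
  | 0, index, result => (index, result)
  | fuel + 1, index, result =>
    if index ≤ (cs.length : Int) - (ss.length : Int) then
      match myCopyFor (PySem.List.slice cs (some index) (some (index + (ss.length : Int)))) ss 0 with
      | none => myCopyLoop cs ss fuel (index + 1) (result + 1)
      | some t => myCopyLoop cs ss fuel (index + (t : Int)) (result + 1)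
    else (index, result)

def my_copy (long : String) (short : String) : Int :=
  let cs := long.toList
  let ss := short.toList
  let p := myCopyLoop cs ss (cs.length + 1) 0 0
  if p.1 ≠ (cs.length : Int) - (ss.length : Int) then p.2 + ((cs.length : Int) - p.1) else p.2

-- ===== PORT B =====
-- Source B's `while` loop: find the next occurrence, type the gap, paste, jump past it.
-- Fuel only makes it total in Lean (the Python loops forever exactly when short = "").
def myCopyAltLoop (cs ss : List Char) : Nat → Int → Int → Int
  | 0, i, ops => ops + ((cs.length : Int) - i)
  | fuel + 1, i, ops =>
    if i + (ss.length : Int) ≤ (cs.length : Int) then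
      let j := PySem.Chars.findFrom cs ss i
      if j = -1 then ops + ((cs.length : Int) - i)
      else myCopyAltLoop cs ss fuel (j + (ss.length : Int)) (ops + (j - i) + 1)
    else ops + ((cs.length : Int) - i)

def my_copy_alt (long : String) (short : String) : Int :=
  myCopyAltLoop long.toList short.toList (long.toList.length + 1) 0 0

-- ===== PRECONDITION & SPEC =====
-- Pre_ excludes only short = "", on which A (and B) loop forever and return nothing.
def Pre_my_copy (long : String) (short : String) : Prop := short ≠ ""
instance (long : String) (short : String) : Decidable (Pre_my_copy long short) := by unfold Pre_my_copy; infer_instance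
def pvWitness_my_copy : String × String := ("abcabcxx", "abc")
def Spec_my_copy (long : String) (short : String) (out : Int) : Prop := out = my_copy_alt long short
instance (long : String) (short : String) (out : Int) : Decidable (Spec_my_copy long short out) := by unfold Spec_my_copy; infer_instance

-- ===== CLAIM (what is proved, stated in full; the proofs are below) =====
def Claim_equal_my_copy : Prop := ∀ (long : String) (short : String), Dom_my_copy long short → Pre_my_copy long short → Spec_my_copy long short (my_copy long short)

-- ===== LEMMAS AND PROOFS =====

theorem myCopyFor_eq (ss : List Char) (w : List Char) : ∀ (t : Nat), t + w.length ≤ ss.length →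
    myCopyFor w ss t = if w = (ss.drop t).take w.length then some (t + w.length) else none := by
  induction w with
  | nil => intro t ht; simp [myCopyFor]
  | cons a w' ih =>
    intro t ht
    have htlt : t < ss.length := by simp at ht; omega
    have hget : ss.getD t ' ' = ss[t] := List.getD_eq_getElem ss ' ' htlt
    have hdrop : ss.drop t = ss[t] :: ss.drop (t + 1) := (List.getElem_cons_drop htlt).symm
    rw [myCopyFor, hget, hdrop]
    by_cases hc : a = ss[t]
    · subst hc
      rw [if_pos rfl, ih (t + 1) (by simp at ht ⊢; omega)]
      simp only [List.length_cons, List.take_succ_cons, List.cons.injEq, true_and]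
      split
      · exact congrArg some (by omega)
      · rfl
    · rw [if_neg hc]
      simp only [List.length_cons, List.take_succ_cons]
      rw [if_neg (by intro h; exact hc (List.cons.inj h).1)]

theorem A_window (cs ss : List Char) (i : Nat) :
    PySem.List.slice cs (some (i : Int)) (some ((i : Int) + (ss.length : Int)))
      = (cs.drop i).take ss.length := by
  rw [PySem.List.slice_toNat cs (by positivity) (by positivity)]
  congr 1 <;> omega

theorem A_exit (cs ss : List Char) (fuel : Nat) (i : Nat) (r : Int)
    (h : cs.length < i + ss.length) :
    myCopyLoop cs ss fuel (i : Int) r = ((i : Int), r) := by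
  cases fuel with
  | zero => rfl
  | succ f => rw [myCopyLoop, if_neg (by push_cast; omega)]

theorem B_exit (cs ss : List Char) (fuel : Nat) (i : Nat) (r : Int)
    (h : cs.length < i + ss.length) :
    myCopyAltLoop cs ss fuel (i : Int) r = r + ((cs.length : Int) - (i : Int)) := by
  cases fuel with
  | zero => rfl
  | succ f => rw [myCopyAltLoop, if_neg (by push_cast; omega)]

theorem A_step (cs ss : List Char) (fuel : Nat) (i : Nat) (r : Int)
    (h1 : i + ss.length ≤ cs.length) :
    myCopyLoop cs ss (fuel + 1) (i : Int) r =
      if ss <+: cs.drop i then myCopyLoop cs ss fuel ((i : Int) + (ss.length : Int)) (r + 1)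
      else myCopyLoop cs ss fuel ((i : Int) + 1) (r + 1) := by
  have hw : ((cs.drop i).take ss.length).length = ss.length := by
    simp; omega
  have hfor := myCopyFor_eq ss ((cs.drop i).take ss.length) 0 (by omega)
  rw [myCopyLoop, if_pos (by push_cast; omega), A_window, hfor]
  simp only [List.drop_zero, hw, Nat.zero_add, List.take_length]
  have hpre : (ss <+: cs.drop i) ↔ ((cs.drop i).take ss.length = ss) := by
    rw [List.prefix_iff_eq_take]
    constructor <;> intro h <;> exact h.symm
  by_cases hp : ss <+: cs.drop i
  · rw [if_pos (hpre.mp hp), if_pos hp]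
  · rw [if_neg (fun h => hp (hpre.mpr h)), if_neg hp]

theorem A_skip (cs ss : List Char) (k : Nat) : ∀ (i : Nat) (r : Int) (fuel : Nat),
    i + k + ss.length ≤ cs.length →
    (∀ t, i ≤ t → t < i + k → ¬ ss <+: cs.drop t) →
    myCopyLoop cs ss (fuel + k) (i : Int) r = myCopyLoop cs ss fuel ((i : Int) + (k : Int)) (r + (k : Int)) := by
  induction k with
  | zero => intro i r fuel _ _; norm_num
  | succ k ih =>
    intro i r fuel hlen hno
    have hstep := A_step cs ss (fuel + k) i r (by omega)
    rw [show fuel + (k + 1) = (fuel + k) + 1 by omega, hstep,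
      if_neg (hno i le_rfl (by omega))]
    have := ih (i + 1) (r + 1) fuel (by omega) (fun t h1 h2 => hno t (by omega) (by omega))
    push_cast at this ⊢
    rw [show (i : Int) + 1 = ((i + 1 : Nat) : Int) by push_cast; ring] at *
    rw [this]
    congr 1 <;> push_cast <;> ring

def aFinish (n m : Nat) (p : Int × Int) : Int :=
  if p.1 ≠ (n : Int) - (m : Int) then p.2 + ((n : Int) - p.1) else p.2

theorem aFinish_def (n m : Nat) (p : Int × Int) :
    aFinish n m p = if p.1 ≠ (n : Int) - (m : Int) then p.2 + ((n : Int) - p.1) else p.2 := rfl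


theorem infix_drop_succ (cs ss : List Char) (i : Nat) (hi : i < cs.length)
    (h : ss <:+: cs.drop (i + 1)) : ss <:+: cs.drop i := by
  rw [← List.getElem_cons_drop hi]
  exact h.trans (List.suffix_cons cs[i] _).isInfix

theorem A_no_match (cs ss : List Char) (hm : 1 ≤ ss.length) (d : Nat) :
    ∀ (i : Nat) (r : Int) (fuel : Nat),
    i ≤ cs.length → cs.length - i ≤ d → cs.length - i < fuel →
    ¬ ss <:+: cs.drop i →
    aFinish cs.length ss.length (myCopyLoop cs ss fuel (i : Int) r)
      = r + ((cs.length : Int) - (i : Int)) := by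
  induction d with
  | zero =>
    intro i r fuel hi hd _ _
    rw [A_exit cs ss fuel i r (by omega), aFinish_def]
    rw [if_pos (by simp; omega)]
  | succ d ih =>
    intro i r fuel hi hd hf hinf
    by_cases hc : i + ss.length ≤ cs.length
    · obtain ⟨f, rfl⟩ : ∃ f, fuel = f + 1 := ⟨fuel - 1, by omega⟩
      rw [A_step cs ss f i r hc,
        if_neg (fun h => hinf h.isInfix)]
      rw [show (i : Int) + 1 = ((i + 1 : Nat) : Int) by push_cast; ring]
      rw [ih (i + 1) (r + 1) f (by omega) (by omega) (by omega)
        (fun h => hinf (infix_drop_succ cs ss i (by omega) h))]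
      push_cast; ring
    · rw [A_exit cs ss fuel i r (by omega), aFinish_def,
        if_pos (by simp; omega)]

theorem B_step_found (cs ss : List Char) (g : Nat) (i : Nat) (r : Int)
    (h1 : i + ss.length ≤ cs.length)
    (hj : PySem.Chars.findFrom cs ss (i : Int) ≠ -1) :
    myCopyAltLoop cs ss (g + 1) (i : Int) r
      = myCopyAltLoop cs ss g (PySem.Chars.findFrom cs ss (i : Int) + (ss.length : Int))
          (r + (PySem.Chars.findFrom cs ss (i : Int) - (i : Int)) + 1) := by
  rw [myCopyAltLoop, if_pos (by push_cast; omega)]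
  rw [if_neg hj]

theorem B_step_none (cs ss : List Char) (g : Nat) (i : Nat) (r : Int)
    (h1 : i + ss.length ≤ cs.length)
    (hj : PySem.Chars.findFrom cs ss (i : Int) = -1) :
    myCopyAltLoop cs ss (g + 1) (i : Int) r = r + ((cs.length : Int) - (i : Int)) := by
  rw [myCopyAltLoop, if_pos (by push_cast; omega)]
  rw [if_pos hj]

theorem main_lemma (cs ss : List Char) (hm : 1 ≤ ss.length) (d : Nat) :
    ∀ (i : Nat) (r : Int) (fa fb : Nat),
    i ≤ cs.length → cs.length - i ≤ d → cs.length - i < fa → cs.length - i < fb →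
    aFinish cs.length ss.length (myCopyLoop cs ss fa (i : Int) r)
      = myCopyAltLoop cs ss fb (i : Int) r := by
  induction d with
  | zero =>
    intro i r fa fb hi hd _ _
    rw [A_exit cs ss fa i r (by omega), aFinish_def, if_pos (by simp; omega),
      B_exit cs ss fb i r (by omega)]
  | succ d ih =>
    intro i r fa fb hi hd hfa hfb
    by_cases hc : i + ss.length ≤ cs.length
    · obtain ⟨g, rfl⟩ : ∃ g, fb = g + 1 := ⟨fb - 1, by omega⟩
      by_cases hj : PySem.Chars.findFrom cs ss (i : Int) = -1
      · rw [B_step_none cs ss g i r hc hj]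
        exact A_no_match cs ss hm (d + 1) i r fa hi hd hfa
          ((PySem.Chars.findFrom_natCast_eq_neg_one_iff cs ss i hi).mp hj)
      · obtain ⟨hij, hpre, hmin⟩ := PySem.Chars.findFrom_natCast_spec cs ss i hi hj
        have hj0 : (0:Int) ≤ PySem.Chars.findFrom cs ss (i : Int) := le_trans (by positivity) hij
        obtain ⟨p, hjp⟩ : ∃ p : Nat, PySem.Chars.findFrom cs ss (i : Int) = (p : Int) :=
          ⟨_, (Int.toNat_of_nonneg hj0).symm⟩
        rw [hjp] at hpre hmin hij
        simp only [Int.toNat_natCast] at hpre hmin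
        have hip : i ≤ p := by exact_mod_cast hij
        have hplen : ss.length ≤ cs.length - p := by
          have := hpre.length_le; simpa using this
        have hpn : p + ss.length ≤ cs.length := by omega
        obtain ⟨fa', hfa'⟩ : ∃ fa', fa = (fa' + 1) + (p - i) := ⟨fa - (p - i) - 1, by omega⟩
        rw [B_step_found cs ss g i r hc hj, hjp, hfa',
          A_skip cs ss (p - i) i r (fa' + 1) (by omega) (fun t h1 h2 => hmin t h1 (by omega))]
        rw [show (i : Int) + ((p - i : Nat) : Int) = (p : Int) by omega]
        rw [A_step cs ss fa' p (r + ((p - i : Nat) : Int)) hpn, if_pos hpre]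
        rw [show (p : Int) + (ss.length : Int) = ((p + ss.length : Nat) : Int) by push_cast; ring]
        rw [ih (p + ss.length) (r + ((p - i : Nat) : Int) + 1) fa' g (by omega) (by omega) (by omega) (by omega)]
        congr 1 <;> push_cast <;> omega
    · rw [A_exit cs ss fa i r (by omega), aFinish_def, if_pos (by simp; omega),
        B_exit cs ss fb i r (by omega)]

-- ===== VERDICT (by name: the statement is the Claim_ definition above) =====
theorem my_copy_spec : Claim_equal_my_copy := by
  intro long short _ hpre
  unfold Spec_my_copy my_copy my_copy_alt
  have hm : 1 ≤ short.toList.length := by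
    rcases Nat.eq_zero_or_pos short.toList.length with h | h
    · exact absurd (String.toList_inj.mp (by simpa using List.length_eq_zero_iff.mp h)) hpre
    · exact h
  have h := main_lemma long.toList short.toList hm long.toList.length 0 0
    (long.toList.length + 1) (long.toList.length + 1)
    (Nat.zero_le _) (by omega) (by omega) (by omega)
  simpa [aFinish] using h
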